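-- pv_equiv track=rewrite | github.com/Introduction-to-Programming-OSOWSKI/4-7-remove-evens-JustinInthaly21 | main.py | removeEvens
-- ===== SOURCE A (Python) =====
-- def removeEvens(k):
--     g = k
--     h = 0
--     for i in range(0, len(k)):
--         if g[i - h] % 2 == 0 and g[i - h] != 0:
--             g.pop(i - h)
--             h = h + 1
--
--     return g
-- ===== SOURCE B (Python) =====
-- def removeEvens(k):
--     # Rebuild the kept elements with a comprehension and splice them back
--     # into the same list object (slice assignment), preserving in-place mutation.
--     k[:] = [x for x in k if not (x % 2 == 0 and x != 0)]
--     return k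
-- ===== Notes on version B (the rewrite author's own statement) =====
-- stated objective: faster
-- what changed: Replaces A's index-shifted pop-inside-a-loop deletion with a single comprehension pass whose result is spliced back into k by slice assignment.
import Mathlib
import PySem

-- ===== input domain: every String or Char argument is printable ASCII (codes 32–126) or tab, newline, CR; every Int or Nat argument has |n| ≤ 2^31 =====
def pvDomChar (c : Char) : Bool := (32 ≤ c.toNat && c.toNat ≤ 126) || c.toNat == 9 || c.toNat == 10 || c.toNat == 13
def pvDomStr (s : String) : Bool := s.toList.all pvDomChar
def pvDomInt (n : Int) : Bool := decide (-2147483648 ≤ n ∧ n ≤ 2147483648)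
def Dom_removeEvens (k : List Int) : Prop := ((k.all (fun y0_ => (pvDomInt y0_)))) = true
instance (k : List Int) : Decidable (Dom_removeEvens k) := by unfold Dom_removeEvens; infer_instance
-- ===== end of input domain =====

-- B replaces A's O(n^2) pop-inside-a-loop deletion with a single comprehension pass
-- spliced back into k by slice assignment; both mutate k in place and return it, so the
-- equivalence proved here covers the returned value (which is the mutated list itself).

-- ===== PORT A =====
-- A's loop: for i in range(0, len(k)): if g[i-h] % 2 == 0 and g[i-h] != 0: g.pop(i-h); h += 1
-- The 'none' arms are Python's IndexError; A's indices are always in range, so they never fire.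
def removeEvensStepA (s : List Int × Int) (i : Nat) : List Int × Int :=
  match PySem.List.pyGet? s.1 ((i : Int) - s.2) with
  | none => s
  | some v =>
    if PySem.Int.mod v 2 == 0 && v != 0 then
      match PySem.List.pop? s.1 ((i : Int) - s.2) with
      | none => s
      | some r => (r.2, s.2 + 1)
    else s

def removeEvens (k : List Int) : List Int :=
  ((List.range k.length).foldl removeEvensStepA (k, 0)).1

-- ===== PORT B =====
-- B's comprehension: [x for x in k if not (x % 2 == 0 and x != 0)], structural recursion over k;
-- the slice assignment k[:] = … only re-binds the same object's contents, the returned value is this list.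
def removeEvensKeep (l : List Int) : List Int :=
  match l with
  | [] => []
  | x :: xs =>
    if !(PySem.Int.mod x 2 == 0 && x != 0) then x :: removeEvensKeep xs
    else removeEvensKeep xs

def removeEvens_alt (k : List Int) : List Int := removeEvensKeep k

-- ===== PRECONDITION & SPEC =====
def Spec_removeEvens (k : List Int) (out : List Int) : Prop := out = removeEvens_alt k
instance (k : List Int) (out : List Int) : Decidable (Spec_removeEvens k out) := by unfold Spec_removeEvens; infer_instance

-- ===== CLAIM =====
def Claim_equal_removeEvens : Prop := ∀ (k : List Int), Dom_removeEvens k → Spec_removeEvens k (removeEvens k)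

-- ===== LEMMAS AND PROOFS =====

-- the shared "keep" predicate: keep x unless x is a nonzero even number
def pvKeep (x : Int) : Bool := !(PySem.Int.mod x 2 == 0 && x != 0)

lemma pvErase_mid (done : List Int) (x : Int) (xs : List Int) :
    (done ++ x :: xs).eraseIdx done.length = done ++ xs := by
  induction done with
  | nil => simp
  | cons d ds ih => simpa using ih

-- A's step at index done.length + h on list done ++ x :: xs, written as one if
lemma pvStepA_mid (done : List Int) (x : Int) (xs : List Int) (h : Nat) :
    removeEvensStepA (done ++ x :: xs, (h : Int)) (done.length + h)
      = if PySem.Int.mod x 2 == 0 && x != 0 then (done ++ xs, (h : Int) + 1)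
        else (done ++ x :: xs, (h : Int)) := by
  have hidx : ((done.length + h : Nat) : Int) - (h : Int) = ((done.length : Nat) : Int) := by
    push_cast; omega
  have hlen : done.length < (done ++ x :: xs).length := by simp
  simp only [removeEvensStepA, hidx, PySem.List.pyGet?_append_length]
  cases hcond : (PySem.Int.mod x 2 == 0 && x != 0)
  · rw [if_neg Bool.false_ne_true, if_neg Bool.false_ne_true]
  · rw [if_pos rfl, if_pos rfl,
      PySem.List.pop?_natCast (done ++ x :: xs) done.length hlen, pvErase_mid]

-- A's loop invariant: after the prefix producing 'done' (all kept) with h pops,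
-- the remaining iterations are indices done.length + h, … and process 'rest'.
lemma removeEvensA_inv (rest done : List Int) (h : Nat) :
    (List.range' (done.length + h) rest.length).foldl removeEvensStepA
        (done ++ rest, (h : Int)) =
      (done ++ rest.filter pvKeep,
       ((h + (rest.length - (rest.filter pvKeep).length) : Nat) : Int)) := by
  induction rest generalizing done h with
  | nil => simp
  | cons x xs ih =>
    simp only [List.length_cons]
    rw [List.range'_succ, List.foldl_cons, pvStepA_mid]
    cases hcond : (PySem.Int.mod x 2 == 0 && x != 0)
    · -- kept
      have hk : pvKeep x = true := by unfold pvKeep; rw [hcond]; decide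
      rw [if_neg Bool.false_ne_true]
      have hstep := ih (done ++ [x]) h
      simp only [List.length_append, List.length_cons, List.length_nil] at hstep
      have harr : done.length + (0 + 1) + h = done.length + h + 1 := by omega
      rw [harr, List.append_assoc] at hstep
      simp only [List.singleton_append] at hstep
      rw [hstep]
      have hle : (xs.filter pvKeep).length ≤ xs.length := List.length_filter_le _ _
      simp only [List.filter_cons, hk, if_true, List.length_cons]
      rw [Prod.mk.injEq]
      exact ⟨by simp, by congr 1; omega⟩
    · -- removed
      have hk : pvKeep x = false := by unfold pvKeep; rw [hcond]; decide
      rw [if_pos rfl]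
      have hstep := ih done (h + 1)
      have harr : done.length + (h + 1) = done.length + h + 1 := by omega
      rw [harr] at hstep
      have hc : ((h + 1 : Nat) : Int) = (h : Int) + 1 := by push_cast; ring
      rw [hc] at hstep
      rw [hstep]
      have hle : (xs.filter pvKeep).length ≤ xs.length := List.length_filter_le _ _
      simp only [List.filter_cons, hk, Bool.false_eq_true, if_false]
      rw [Prod.mk.injEq]
      exact ⟨rfl, by congr 1; omega⟩

lemma removeEvens_eq_filter (k : List Int) : removeEvens k = k.filter pvKeep := by
  have hinv := removeEvensA_inv k [] 0
  simp only [List.length_nil, List.nil_append, Nat.zero_add, Nat.cast_zero] at hinv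
  simp [removeEvens, List.range_eq_range', hinv]

lemma removeEvensKeep_eq_filter (l : List Int) : removeEvensKeep l = l.filter pvKeep := by
  induction l with
  | nil => rfl
  | cons x xs ih =>
    simp only [removeEvensKeep, List.filter_cons, ih, pvKeep]
    rfl

-- ===== VERDICT =====
theorem removeEvens_spec : Claim_equal_removeEvens := by
  intro k _
  unfold Spec_removeEvens
  rw [removeEvens_eq_filter, removeEvens_alt, removeEvensKeep_eq_filter]
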